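-- pv_equiv track=rewrite | github.com/Tanya1427/The_Grind | faulty_keyboard.py | finalString
-- ===== SOURCE A (Python) =====
-- def finalString(s: str) -> str:
--     groups = s.split('i')
--     n = len(groups)
--     final_pos = n - 2
--     index = 0
--     result = [0] * n
--     while final_pos >= 0:
--         result[index] = groups[final_pos][::-1]
--         index += 1
--         final_pos -= 2
--     final_pos = abs(final_pos + 1)  # Reset
--     while index < n:
--         result[index] = groups[final_pos]
--         index += 1
--         final_pos += 2
--     return "".join(result)
-- ===== SOURCE B (Python) =====
-- def finalString(s: str) -> str:
--     result = []
--     for c in s: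
--         if c == 'i':
--             result.reverse()
--         else:
--             result.append(c)
--     return "".join(result)
-- ===== Notes on version B (the rewrite author's own statement) =====
-- stated objective: simpler
-- what changed: Replaced A's split-and-reconstruct approach (split the string on the reversal marker, then rebuild via two index-stepping loops over the groups) with the direct one-pass simulation the problem describes: append each ordinary character and reverse the accumulator at each marker.
import Mathlib
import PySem

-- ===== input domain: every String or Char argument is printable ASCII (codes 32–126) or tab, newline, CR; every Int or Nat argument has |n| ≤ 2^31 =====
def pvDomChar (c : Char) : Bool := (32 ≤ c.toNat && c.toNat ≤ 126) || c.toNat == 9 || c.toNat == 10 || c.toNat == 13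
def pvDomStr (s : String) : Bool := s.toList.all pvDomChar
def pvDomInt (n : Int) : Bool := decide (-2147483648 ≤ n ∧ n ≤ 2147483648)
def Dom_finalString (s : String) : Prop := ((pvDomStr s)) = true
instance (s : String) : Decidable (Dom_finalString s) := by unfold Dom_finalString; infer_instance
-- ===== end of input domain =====

-- B replaces A's split-on-'i' + two index-stepping reconstruction loops by the direct
-- one-pass simulation (append / reverse on the accumulator); objective: simpler. Both are total.

-- ===== PORT A =====
-- first while loop: while final_pos >= 0: result[index] = groups[final_pos][::-1]; index += 1; final_pos -= 2
-- (result slots are filled consecutively from index 0, so the port accumulates them in a list;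
--  groups[final_pos] is always in range here, so pyGet? never returns none and getD [] is exact)
def pvDescLoop (groups : List (List Char)) (fp : Int) (index : Int) (acc : List (List Char)) :
    List (List Char) × Int × Int :=
  if h : 0 ≤ fp then
    pvDescLoop groups (fp - 2) (index + 1)
      (acc ++ [(PySem.Chars.slice? ((PySem.List.pyGet? groups fp).getD []) none none (-1)).getD []])
  else (acc, index, fp)
termination_by (fp + 2).toNat
decreasing_by simp; omega

-- second while loop: while index < n: result[index] = groups[final_pos]; index += 1; final_pos += 2
def pvAscLoop (groups : List (List Char)) (n index fp : Int) (acc : List (List Char)) :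
    List (List Char) :=
  if h : index < n then
    pvAscLoop groups n (index + 1) (fp + 2) (acc ++ [(PySem.List.pyGet? groups fp).getD []])
  else acc
termination_by (n - index).toNat
decreasing_by simp; omega

def finalString (s : String) : String :=
  let groups := PySem.Chars.splitOn s.toList ['i']
  let n : Int := groups.length
  let r1 := pvDescLoop groups (n - 2) 0 []
  let reset : Int := |r1.2.2 + 1|
  let res := pvAscLoop groups n r1.2.1 reset r1.1
  String.ofList (PySem.Chars.join [] res)

-- ===== PORT B =====
def finalString_alt (s : String) : String :=
  String.ofList (s.toList.foldl (fun r c => if c = 'i' then r.reverse else r ++ [c]) [])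

-- ===== PRECONDITION & SPEC =====
def Spec_finalString (s : String) (out : String) : Prop := out = finalString_alt s
instance (s : String) (out : String) : Decidable (Spec_finalString s out) := by unfold Spec_finalString; infer_instance

-- ===== CLAIM (what is proved, stated in full; the proofs are below) =====
def Claim_equal_finalString : Prop := ∀ (s : String), Dom_finalString s → Spec_finalString s (finalString s)

-- ===== LEMMAS AND PROOFS =====

-- ---- generic indexing helper
lemma pvGet_eq {α : Type} (l : List α) (i : Int) (h : 0 ≤ i) (h2 : i < l.length) :
    PySem.List.pyGet? l i = l[i.toNat]? := by
  unfold PySem.List.pyGet? PySem.List.pyIdx?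
  rw [if_pos h, if_pos h2]
  simp

-- ---- structural mirror of Python's s.split('i') (sep nonempty, keeps empty pieces)
def pvMsplit : List Char → List (List Char)
  | [] => [[]]
  | c :: rest =>
    if c = 'i' then [] :: pvMsplit rest
    else match pvMsplit rest with
      | [] => [[c]]
      | g :: gs => (c :: g) :: gs

lemma pvMsplit_ne_nil (cs : List Char) : pvMsplit cs ≠ [] := by
  cases cs with
  | nil => simp [pvMsplit]
  | cons c rest =>
    simp only [pvMsplit]
    split
    · simp
    · split <;> simp_all

lemma pvGo_spec (fuel : Nat) : ∀ (l cur : List Char) (accs : List (List Char)),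
    l.length ≤ fuel →
    PySem.Chars.splitOn.go ['i'] fuel l cur accs
      = accs.reverse ++ (pvMsplit l).modifyHead (cur.reverse ++ ·) := by
  induction fuel with
  | zero =>
    intro l cur accs hl
    have : l = [] := by cases l <;> simp_all
    subst this
    simp [PySem.Chars.splitOn.go, pvMsplit]
  | succ fuel ih =>
    intro l cur accs hl
    cases l with
    | nil => simp [PySem.Chars.splitOn.go, pvMsplit]
    | cons c rest =>
      by_cases hc : c = 'i'
      · subst hc
        rw [show PySem.Chars.splitOn.go ['i'] (fuel + 1) ('i' :: rest) cur accs
              = PySem.Chars.splitOn.go ['i'] fuel rest [] (cur.reverse :: accs) by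
            simp [PySem.Chars.splitOn.go, List.isPrefixOf]]
        rw [ih rest [] (cur.reverse :: accs) (by simpa using Nat.lt_succ_iff.mp (by simpa using hl))]
        obtain ⟨g, gs, hgs⟩ := List.exists_cons_of_ne_nil (pvMsplit_ne_nil rest)
        simp [pvMsplit, hgs, List.modifyHead]
      · have hc' : ¬ ('i' = c) := fun h => hc h.symm
        rw [show PySem.Chars.splitOn.go ['i'] (fuel + 1) (c :: rest) cur accs
              = PySem.Chars.splitOn.go ['i'] fuel rest (c :: cur) accs by
            simp [PySem.Chars.splitOn.go, List.isPrefixOf, hc']]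
        rw [ih rest (c :: cur) accs (by simpa using Nat.lt_succ_iff.mp (by simpa using hl))]
        obtain ⟨g, gs, hgs⟩ := List.exists_cons_of_ne_nil (pvMsplit_ne_nil rest)
        simp [pvMsplit, hgs, hc, List.modifyHead]

lemma pvSplitOn_eq_msplit (cs : List Char) :
    PySem.Chars.splitOn cs ['i'] = pvMsplit cs := by
  rw [show PySem.Chars.splitOn cs ['i'] = PySem.Chars.splitOn.go ['i'] (cs.length + 1) cs [] [] from rfl]
  rw [pvGo_spec (cs.length + 1) cs [] [] (by omega)]
  obtain ⟨g, gs, hgs⟩ := List.exists_cons_of_ne_nil (pvMsplit_ne_nil cs)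
  simp [hgs, List.modifyHead]

-- ---- B-side: the fold equals a group-by-group simulation over msplit
def pvSimB : List (List Char) → List Char → List Char
  | [], r => r
  | [g], r => r ++ g
  | g :: g' :: gs, r => pvSimB (g' :: gs) ((r ++ g).reverse)

lemma pvSimB_cons (g : List Char) (gs : List (List Char)) (r : List Char) (h : gs ≠ []) :
    pvSimB (g :: gs) r = pvSimB gs ((r ++ g).reverse) := by
  cases gs with
  | nil => exact absurd rfl h
  | cons g' gs' => rfl

lemma pvFold_eq_simB (cs : List Char) : ∀ r : List Char,
    cs.foldl (fun r c => if c = 'i' then r.reverse else r ++ [c]) r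
      = pvSimB (pvMsplit cs) r := by
  induction cs with
  | nil => intro r; simp [pvMsplit, pvSimB]
  | cons c rest ih =>
    intro r
    by_cases hc : c = 'i'
    · subst hc
      rw [List.foldl_cons]
      rw [show (if ('i':Char) = 'i' then r.reverse else r ++ ['i']) = r.reverse by simp]
      rw [ih r.reverse]
      rw [show pvMsplit ('i' :: rest) = [] :: pvMsplit rest by simp [pvMsplit]]
      rw [pvSimB_cons [] (pvMsplit rest) r (pvMsplit_ne_nil rest)]
      simp
    · rw [List.foldl_cons]
      rw [show (if c = 'i' then r.reverse else r ++ [c]) = r ++ [c] by simp [hc]]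
      rw [ih (r ++ [c])]
      obtain ⟨g, gs, hgs⟩ := List.exists_cons_of_ne_nil (pvMsplit_ne_nil rest)
      rw [show pvMsplit (c :: rest) = (c :: g) :: gs by simp [pvMsplit, hc, hgs]]
      rw [hgs]
      cases gs with
      | nil => simp [pvSimB]
      | cons g2 gs' =>
        rw [pvSimB_cons (c :: g) (g2 :: gs') r (by simp),
            pvSimB_cons g (g2 :: gs') (r ++ [c]) (by simp)]
        rw [show (r ++ [c]) ++ g = r ++ (c :: g) by simp]

-- ---- state after processing a list of groups (each group appended then the whole reversed)
def pvPstate : List Char → List (List Char) → List Char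
  | r, [] => r
  | r, g :: gs => pvPstate ((r ++ g).reverse) gs

lemma pvSimB_snoc (front : List (List Char)) (g : List Char) : ∀ r,
    pvSimB (front ++ [g]) r = pvPstate r front ++ g := by
  induction front with
  | nil => intro r; simp [pvSimB, pvPstate]
  | cons h t ih =>
    intro r
    rw [List.cons_append, pvSimB_cons h (t ++ [g]) r (by simp), ih]
    rfl

lemma pvPstate_snoc (front : List (List Char)) (g : List Char) : ∀ r,
    pvPstate r (front ++ [g]) = (pvPstate r front ++ g).reverse := by
  induction front with
  | nil => intro r; simp [pvPstate]
  | cons h t ih => intro r; rw [List.cons_append]; simp only [pvPstate]; rw [ih]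

-- ---- closed form of the state over the REVERSED front (topmost group first)
def pvDs : List (List Char) → List Char × List Char
  | [] => ([], [])
  | g :: t => (g.reverse ++ (pvDs t).2.reverse, (pvDs t).1.reverse)

lemma pvDs1_cons2 (g0 g1 : List Char) (t : List (List Char)) :
    (pvDs (g0 :: g1 :: t)).1 = g0.reverse ++ (pvDs t).1 := by
  simp [pvDs]

lemma pvDs2_cons2 (g0 g1 : List Char) (t : List (List Char)) :
    (pvDs (g0 :: g1 :: t)).2 = (pvDs t).2 ++ g1 := by
  simp [pvDs]

lemma pvPstate_ds (rt : List (List Char)) :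
    pvPstate [] rt.reverse = (pvDs rt).1 ++ (pvDs rt).2 := by
  induction rt with
  | nil => simp [pvPstate, pvDs]
  | cons g t ih =>
    rw [List.reverse_cons, pvPstate_snoc, ih]
    simp [pvDs]

-- ---- A-side: accumulator-free versions of the two loops
def pvD (groups : List (List Char)) (fp : Int) : List (List Char) :=
  if h : 0 ≤ fp then ((PySem.List.pyGet? groups fp).getD []).reverse :: pvD groups (fp - 2) else []
termination_by (fp + 2).toNat
decreasing_by simp; omega

def pvS (groups : List (List Char)) (n index fp : Int) : List (List Char) :=
  if h : index < n then ((PySem.List.pyGet? groups fp).getD []) :: pvS groups n (index + 1) (fp + 2) else []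
termination_by (n - index).toNat
decreasing_by simp; omega

lemma pvDescLoop_eq (groups : List (List Char)) : ∀ (m : Nat) (fp index : Int) (acc : List (List Char)),
    (fp + 2).toNat = m →
    pvDescLoop groups fp index acc
      = (acc ++ pvD groups fp, index + ((pvD groups fp).length : Int),
         if 0 ≤ fp then PySem.Int.mod fp 2 - 2 else fp) := by
  intro m
  induction m using Nat.strong_induction_on with
  | _ m ih =>
    intro fp index acc hm
    rw [pvDescLoop, pvD]
    by_cases h : 0 ≤ fp
    · rw [dif_pos h, dif_pos h, if_pos h]
      rw [ih ((fp - 2) + 2).toNat (by omega) (fp - 2) (index + 1) _ rfl]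
      have hrev : (PySem.Chars.slice? ((PySem.List.pyGet? groups fp).getD []) none none (-1)).getD []
          = ((PySem.List.pyGet? groups fp).getD []).reverse := by
        rw [PySem.Chars.slice?_eq_listSlice?, PySem.List.slice?_none_none_neg_one]
        rfl
      refine Prod.ext ?_ (Prod.ext ?_ ?_)
      · rw [hrev]; simp
      · simp; omega
      · by_cases h2 : 0 ≤ fp - 2
        · simp only [if_pos h2]
          have e1 : PySem.Int.mod (fp - 2) 2 = (fp - 2) % 2 := PySem.Int.mod_eq_emod_of_pos (by omega)
          have e2 : PySem.Int.mod fp 2 = fp % 2 := PySem.Int.mod_eq_emod_of_pos (by omega)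
          rw [e1, e2]; omega
        · simp only [if_neg h2]
          have e2 : PySem.Int.mod fp 2 = fp % 2 := PySem.Int.mod_eq_emod_of_pos (by omega)
          rw [e2]; omega
    · rw [dif_neg h, dif_neg h, if_neg h]
      simp

lemma pvAscLoop_eq (groups : List (List Char)) (n : Int) : ∀ (m : Nat) (index fp : Int) (acc : List (List Char)),
    (n - index).toNat = m →
    pvAscLoop groups n index fp acc = acc ++ pvS groups n index fp := by
  intro m
  induction m using Nat.strong_induction_on with
  | _ m ih =>
    intro index fp acc hm
    rw [pvAscLoop, pvS]
    by_cases h : index < n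
    · rw [dif_pos h, dif_pos h]
      rw [ih (n - (index + 1)).toNat (by omega) (index + 1) (fp + 2) _ rfl]
      simp
    · rw [dif_neg h, dif_neg h]
      simp

-- pvS depends on n and index only through their difference
lemma pvS_shift (groups : List (List Char)) : ∀ (m : Nat) (n index n' index' fp : Int),
    (n - index).toNat = m → n - index = n' - index' →
    pvS groups n index fp = pvS groups n' index' fp := by
  intro m
  induction m using Nat.strong_induction_on with
  | _ m ih =>
    intro n index n' index' fp hm heq
    rw [pvS]
    conv_rhs => rw [pvS]
    by_cases h : index < n
    · rw [dif_pos h, dif_pos (show index' < n' by omega)]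
      rw [ih (n - (index + 1)).toNat (by omega) n (index + 1) n' (index' + 1) (fp + 2) rfl (by omega)]
    · rw [dif_neg h, dif_neg (show ¬ index' < n' by omega)]

-- dropping an element never read by the ascending loop
lemma pvS_prefix (ys : List (List Char)) (hd : List Char) : ∀ (m : Nat) (n index fp : Int),
    (n - index).toNat = m →
    0 ≤ fp → fp + 2 * (n - index) ≤ ys.length + 1 →
    pvS (ys ++ [hd]) n index fp = pvS ys n index fp := by
  intro m
  induction m using Nat.strong_induction_on with
  | _ m ih =>
    intro n index fp hm hfp hb
    rw [pvS]
    conv_rhs => rw [pvS]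
    by_cases h : index < n
    · rw [dif_pos h, dif_pos h]
      have hlt : fp < (ys.length : Int) := by omega
      have hget : PySem.List.pyGet? (ys ++ [hd]) fp = PySem.List.pyGet? ys fp := by
        rw [pvGet_eq _ _ hfp (by simp; omega), pvGet_eq _ _ hfp (by exact_mod_cast hlt)]
        exact List.getElem?_append_left (by omega)
      rw [hget, ih (n - (index + 1)).toNat (by omega) n (index + 1) (fp + 2) rfl (by omega) (by omega)]
    · rw [dif_neg h, dif_neg h]

-- the last iteration of the ascending loop reads exactly the final group
lemma pvS_last (xs : List (List Char)) (g : List Char) : ∀ (m : Nat) (index fp : Int),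
    ((xs.length : Int) - index).toNat = m →
    fp = 2 * index - xs.length → 0 ≤ fp → index ≤ (xs.length : Int) →
    pvS (xs ++ [g]) ((xs.length : Int) + 1) index fp
      = pvS xs (xs.length : Int) index fp ++ [g] := by
  intro m
  induction m using Nat.strong_induction_on with
  | _ m ih =>
    intro index fp hm hfp hfp0 hle
    by_cases h : index < (xs.length : Int)
    · rw [pvS]
      conv_rhs => rw [pvS]
      rw [dif_pos (by omega), dif_pos h]
      have hget : PySem.List.pyGet? (xs ++ [g]) fp = PySem.List.pyGet? xs fp := by
        rw [pvGet_eq _ _ hfp0 (by simp; omega), pvGet_eq _ _ hfp0 (by exact_mod_cast (show fp < (xs.length : Int) by omega))]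
        exact List.getElem?_append_left (by omega)
      rw [hget, ih ((xs.length : Int) - (index + 1)).toNat (by omega) (index + 1) (fp + 2) rfl (by omega) (by omega) (by omega)]
      simp
    · have hix : index = (xs.length : Int) := by omega
      subst hix
      have hfpv : fp = (xs.length : Int) := by omega
      subst hfpv
      rw [pvS]
      conv_rhs => rw [pvS]
      rw [dif_pos (by omega), dif_neg (by omega)]
      rw [pvGet_eq _ _ (by omega) (by simp)]
      rw [show ((xs.length : Int)).toNat = xs.length by omega]
      rw [List.getElem?_concat_length]
      rw [pvS, dif_neg (by omega)]
      simp

-- the descending loop never reads the last element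
lemma pvD_prefix (xs : List (List Char)) (hd : List Char) : ∀ (m : Nat) (fp : Int),
    (fp + 2).toNat = m → fp < (xs.length : Int) →
    pvD (xs ++ [hd]) fp = pvD xs fp := by
  intro m
  induction m using Nat.strong_induction_on with
  | _ m ih =>
    intro fp hm hlt
    rw [pvD]
    conv_rhs => rw [pvD]
    by_cases h : 0 ≤ fp
    · rw [dif_pos h, dif_pos h]
      have hget : PySem.List.pyGet? (xs ++ [hd]) fp = PySem.List.pyGet? xs fp := by
        rw [pvGet_eq _ _ h (by simp; omega), pvGet_eq _ _ h (by exact_mod_cast hlt)]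
        exact List.getElem?_append_left (by omega)
      rw [hget, ih ((fp - 2) + 2).toNat (by omega) (fp - 2) rfl (by omega)]
    · rw [dif_neg h, dif_neg h]

-- ---- main characterisation: both loops against pvDs over the reversed front
lemma pvMain (m : Nat) : ∀ (rt : List (List Char)) (g : List Char), rt.length ≤ m →
    (pvD rt.reverse ((rt.length : Int) - 1)).flatten = (pvDs rt).1
    ∧ (pvD rt.reverse ((rt.length : Int) - 1)).length = (rt.length + 1) / 2
    ∧ (pvS (rt.reverse ++ [g]) ((rt.length : Int) + 1)
         (((rt.length + 1) / 2 : Nat) : Int)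
         (2 * (((rt.length + 1) / 2 : Nat) : Int) - rt.length)).flatten
        = (pvDs rt).2 ++ g := by
  induction m with
  | zero =>
    intro rt g hlen
    have : rt = [] := by cases rt <;> simp_all
    subst this
    refine ⟨?_, ?_, ?_⟩
    · rw [pvD, dif_neg (by norm_num)]; simp [pvDs]
    · rw [pvD, dif_neg (by norm_num)]; simp
    · simp only [List.reverse_nil, List.nil_append, List.length_nil]
      rw [pvS, dif_pos (by norm_num)]
      rw [pvS, dif_neg (by norm_num)]
      rw [pvGet_eq _ _ (by norm_num) (by norm_num)]
      simp [pvDs]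
  | succ m ih =>
    intro rt g hlen
    match rt with
    | [] =>
      refine ⟨?_, ?_, ?_⟩
      · rw [pvD, dif_neg (by norm_num)]; simp [pvDs]
      · rw [pvD, dif_neg (by norm_num)]; simp
      · simp only [List.reverse_nil, List.nil_append, List.length_nil]
        rw [pvS, dif_pos (by norm_num)]
        rw [pvS, dif_neg (by norm_num)]
        rw [pvGet_eq _ _ (by norm_num) (by norm_num)]
        simp [pvDs]
    | [g0] =>
      refine ⟨?_, ?_, ?_⟩
      · rw [pvD, dif_pos (by norm_num)]
        rw [pvD, dif_neg (by norm_num)]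
        rw [pvGet_eq _ _ (by norm_num) (by norm_num)]
        simp [pvDs]
      · rw [pvD, dif_pos (by norm_num)]
        rw [pvD, dif_neg (by norm_num)]
        simp
      · simp only [List.reverse_cons, List.reverse_nil, List.nil_append, List.length_cons, List.length_nil]
        rw [pvS, dif_pos (by norm_num)]
        rw [pvS, dif_neg (by norm_num)]
        rw [pvGet_eq _ _ (by norm_num) (by norm_num)]
        simp [pvDs]
    | g0 :: g1 :: rt'' =>
      have hlen'' : rt''.length ≤ m := by simp at hlen; omega
      obtain ⟨ihD, ihL, ihS⟩ := ih rt'' g1 hlen''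
      have hk : rt''.length + 2 = (g0 :: g1 :: rt'').length := by simp
      have hrev : (g0 :: g1 :: rt'').reverse = (rt''.reverse ++ [g1]) ++ [g0] := by simp
      set k : Nat := rt''.length + 2 with hkdef
      have hkl : (g0 :: g1 :: rt'').length = k := by simp [hkdef]
      refine ⟨?_, ?_, ?_⟩
      · -- descending entries
        rw [hkl, hrev]
        rw [pvD, dif_pos (by push_cast; omega)]
        have hget : PySem.List.pyGet? ((rt''.reverse ++ [g1]) ++ [g0]) ((k : Int) - 1) = some g0 := by
          rw [pvGet_eq _ _ (by push_cast; omega) (by simp [hkdef]; try push_cast; try omega)]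
          rw [show ((k : Int) - 1).toNat = (rt''.reverse ++ [g1]).length by simp [hkdef]; omega]
          exact List.getElem?_concat_length
        rw [hget]
        have hpre : pvD ((rt''.reverse ++ [g1]) ++ [g0]) ((k : Int) - 1 - 2)
            = pvD rt''.reverse ((rt''.length : Int) - 1) := by
          rw [pvD_prefix _ _ _ _ rfl (by simp [hkdef]; try push_cast; try omega)]
          rw [pvD_prefix _ _ _ _ rfl (by simp [hkdef]; try push_cast; try omega)]
          congr 1
          push_cast [hkdef]; omega
        rw [hpre]
        simp only [Option.getD_some, List.flatten_cons, ihD]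
        rw [pvDs1_cons2]
      · -- descending count
        rw [hkl, hrev]
        rw [pvD, dif_pos (by push_cast; omega)]
        have hpre : pvD ((rt''.reverse ++ [g1]) ++ [g0]) ((k : Int) - 1 - 2)
            = pvD rt''.reverse ((rt''.length : Int) - 1) := by
          rw [pvD_prefix _ _ _ _ rfl (by simp [hkdef]; try push_cast; try omega)]
          rw [pvD_prefix _ _ _ _ rfl (by simp [hkdef]; try push_cast; try omega)]
          congr 1
          push_cast [hkdef]; omega
        rw [hpre]
        simp only [List.length_cons, ihL]
        omega
      · -- ascending entries
        rw [hkl, hrev]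
        have hxs : ((rt''.reverse ++ [g1]) ++ [g0]).length = k := by simp [hkdef]
        have hstep1 : pvS (((rt''.reverse ++ [g1]) ++ [g0]) ++ [g]) ((k : Int) + 1)
              (((k + 1) / 2 : Nat) : Int) (2 * (((k + 1) / 2 : Nat) : Int) - k)
            = pvS ((rt''.reverse ++ [g1]) ++ [g0]) ((k : Int))
                (((k + 1) / 2 : Nat) : Int) (2 * (((k + 1) / 2 : Nat) : Int) - k) ++ [g] := by
          have := pvS_last ((rt''.reverse ++ [g1]) ++ [g0]) g
            (((((rt''.reverse ++ [g1]) ++ [g0]).length : Int) - (((k + 1) / 2 : Nat) : Int)).toNat)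
            (((k + 1) / 2 : Nat) : Int) (2 * (((k + 1) / 2 : Nat) : Int) - k) rfl
            (by rw [hxs]) (by omega) (by rw [hxs]; push_cast; omega)
          rw [hxs] at this
          exact this
        have hstep2 : pvS ((rt''.reverse ++ [g1]) ++ [g0]) ((k : Int))
              (((k + 1) / 2 : Nat) : Int) (2 * (((k + 1) / 2 : Nat) : Int) - k)
            = pvS (rt''.reverse ++ [g1]) ((k : Int))
                (((k + 1) / 2 : Nat) : Int) (2 * (((k + 1) / 2 : Nat) : Int) - k) := by
          apply pvS_prefix _ _ _ _ _ _ rfl (by omega)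
          simp [hkdef]; try push_cast; try omega
        have hstep3 : pvS (rt''.reverse ++ [g1]) ((k : Int))
              (((k + 1) / 2 : Nat) : Int) (2 * (((k + 1) / 2 : Nat) : Int) - k)
            = pvS (rt''.reverse ++ [g1]) ((rt''.length : Int) + 1)
                (((rt''.length + 1) / 2 : Nat) : Int)
                (2 * (((rt''.length + 1) / 2 : Nat) : Int) - rt''.length) := by
          have hd : (((k + 1) / 2 : Nat) : Int) = (((rt''.length + 1) / 2 : Nat) : Int) + 1 := by
            push_cast [hkdef]; omega
          have hfp : (2 * (((k + 1) / 2 : Nat) : Int) - k)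
              = 2 * (((rt''.length + 1) / 2 : Nat) : Int) - rt''.length := by
            push_cast [hkdef]; omega
          rw [hfp]
          apply pvS_shift _ _ _ _ _ _ _ rfl
          push_cast [hkdef]; omega
        rw [hstep1, hstep2, hstep3]
        rw [List.flatten_append, ihS]
        rw [pvDs2_cons2]
        simp

lemma pvFlatInter (parts : List (List Char)) :
    (List.intersperse ([] : List Char) parts).flatten = parts.flatten := by
  induction parts with
  | nil => simp
  | cons g gs ih => cases gs <;> simp_all [List.intersperse]

lemma pvJoin_flatten (parts : List (List Char)) :
    PySem.Chars.join [] parts = parts.flatten := by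
  simp [PySem.Chars.join, List.intercalate, pvFlatInter]

-- ===== VERDICT (by name: the statement is the Claim_ definition above) =====
theorem finalString_spec : Claim_equal_finalString := by
  unfold Claim_equal_finalString Spec_finalString
  intro s _
  unfold finalString finalString_alt
  simp only []
  rw [pvSplitOn_eq_msplit]
  set cs := s.toList with hcs
  have hne := pvMsplit_ne_nil cs
  set groups := pvMsplit cs with hgroups
  set front := groups.dropLast with hfront
  set g := groups.getLast hne with hgdef
  have hsplit : groups = front ++ [g] := (List.dropLast_append_getLast hne).symm
  set k : Nat := front.length with hkdef
  have hn : groups.length = k + 1 := by rw [hsplit]; simp [hkdef]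
  have hfp0 : (groups.length : Int) - 2 = (k : Int) - 1 := by rw [hn]; push_cast; omega
  rw [pvDescLoop_eq groups (((groups.length : Int) - 2) + 2).toNat _ _ _ rfl]
  have hrevrev : (front.reverse).reverse = front := List.reverse_reverse front
  have hrtlen : front.reverse.length = k := by simp [hkdef]
  obtain ⟨hD, hL, hS⟩ := pvMain (front.reverse.length) front.reverse g (le_refl _)
  rw [hrevrev, hrtlen] at hD hL hS
  have hDgroups : pvD groups ((groups.length : Int) - 2) = pvD front ((k : Int) - 1) := by
    rw [hfp0, hsplit]
    exact pvD_prefix _ _ _ _ rfl (by push_cast [hkdef]; omega)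
  -- the reset value |fpEnd + 1| equals 2*((k+1)/2) - k
  have hreset : |(if 0 ≤ (groups.length : Int) - 2 then PySem.Int.mod ((groups.length : Int) - 2) 2 - 2
        else (groups.length : Int) - 2) + 1|
      = 2 * (((k + 1) / 2 : Nat) : Int) - k := by
    by_cases hk0 : k = 0
    · rw [if_neg (by rw [hn, hk0]; norm_num)]
      rw [hn, hk0]
      norm_num
    · rw [if_pos (by rw [hn]; push_cast; omega)]
      rw [hfp0]
      have e : PySem.Int.mod ((k : Int) - 1) 2 = ((k : Int) - 1) % 2 :=
        PySem.Int.mod_eq_emod_of_pos (by omega)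
      rw [e]
      have h01 : ((k : Int) - 1) % 2 = 0 ∨ ((k : Int) - 1) % 2 = 1 := by omega
      rcases h01 with h01 | h01 <;> rw [h01] <;> [skip; skip] <;> rw [abs_of_nonpos (by omega)] <;> omega
  simp only [List.nil_append, zero_add]
  rw [hreset]
  rw [pvAscLoop_eq groups _ _ _ _ _ rfl]
  rw [hDgroups, hL]
  have hSgroups : pvS groups ((groups.length : Int)) ((((k + 1) / 2 : Nat) : Int))
        (2 * (((k + 1) / 2 : Nat) : Int) - k)
      = pvS (front ++ [g]) ((k : Int) + 1) (((k + 1) / 2 : Nat) : Int)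
        (2 * (((k + 1) / 2 : Nat) : Int) - k) := by
    rw [hsplit]
    have hl1 : (((front ++ [g]).length : Nat) : Int) = (k : Int) + 1 := by simp [hkdef]
    rw [hl1]
  rw [hSgroups]
  rw [pvJoin_flatten, List.flatten_append, hD, hS]
  -- B side
  have hps := pvPstate_ds front.reverse
  rw [hrevrev] at hps
  rw [pvFold_eq_simB cs [], ← hgroups, hsplit, pvSimB_snoc, hps]
  simp [List.append_assoc]
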